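-- pv_equiv track=rewrite | github.com/pypi-data/pypi-mirror-226 | packages/monaco-racing-report-kir-boh2/monaco_racing_report_kir_boh2-22.2.1.tar.gz/monaco_racing_report_kir_boh2-22.2.1/src/build_report/get_info_from_files.py | get_time_date_and_racer_abbreviations_from_line
-- ===== SOURCE A (Python) =====
-- def get_time_date_and_racer_abbreviations_from_line(line_to_process):
--     '''Reads file, returns abbreviation, date, racer_time in str format'''
--     # 'i' is used to identify wether char belongs to abbreviation(chars 1-3), date(chars 4-16) or time(chars > 17)
--     abbreviation, date, racer_time = '', '', ''
--     for i, char in enumerate(line_to_process, start=1):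
--         if i <= 3:
--             abbreviation += char
--         elif i <= 16:
--             date += char
--         elif i > 17:
--             racer_time += char
--     return abbreviation, date, racer_time
-- ===== SOURCE B (Python) =====
-- def get_time_date_and_racer_abbreviations_from_line(line_to_process):
--     '''Reads file, returns abbreviation, date, racer_time in str format'''
--     # closed-form slices; third slice starts at 17 because the original
--     # drops the character at 0-based index 16 (its 1-based i == 17 gap)
--     return line_to_process[:3], line_to_process[3:16], line_to_process[17:]
-- ===== Notes on version B (the rewrite author's own statement) =====
-- stated objective: faster
-- what changed: Replaced the per-character enumerate loop (quadratic repeated string concatenation) with three direct string slices line[:3], line[3:16], line[17:] computed in closed form.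
import Mathlib
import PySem

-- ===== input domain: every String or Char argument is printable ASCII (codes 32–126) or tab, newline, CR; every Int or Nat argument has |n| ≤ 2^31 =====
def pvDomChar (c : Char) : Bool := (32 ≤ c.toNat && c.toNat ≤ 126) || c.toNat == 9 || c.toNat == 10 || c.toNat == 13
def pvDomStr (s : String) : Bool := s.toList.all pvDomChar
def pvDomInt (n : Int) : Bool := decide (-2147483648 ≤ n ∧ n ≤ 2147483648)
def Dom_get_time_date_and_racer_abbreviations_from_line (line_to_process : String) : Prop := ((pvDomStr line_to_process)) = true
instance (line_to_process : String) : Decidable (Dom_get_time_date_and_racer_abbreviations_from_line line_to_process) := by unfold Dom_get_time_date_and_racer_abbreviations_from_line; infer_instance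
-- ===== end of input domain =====

-- B replaces A's per-character enumerate loop by three closed-form string slices.


-- ===== PORT A =====
-- the for-loop over enumerate(line, start=1), accumulating the three strings
def pvLoopA : List Char → Nat → List Char × List Char × List Char → List Char × List Char × List Char
  | [], _, st => st
  | c :: rest, i, (a, d, t) =>
      if i ≤ 3 then pvLoopA rest (i + 1) (a ++ [c], d, t)
      else if i ≤ 16 then pvLoopA rest (i + 1) (a, d ++ [c], t)
      else if i > 17 then pvLoopA rest (i + 1) (a, d, t ++ [c])
      else pvLoopA rest (i + 1) (a, d, t)

def get_time_date_and_racer_abbreviations_from_line (line_to_process : String) : String × String × String :=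
  let r := pvLoopA line_to_process.toList 1 ([], [], [])
  (String.ofList r.1, String.ofList r.2.1, String.ofList r.2.2)

-- ===== PORT B =====
def get_time_date_and_racer_abbreviations_from_line_alt (line_to_process : String) : String × String × String :=
  (PySem.Str.slice line_to_process none (some 3),
   PySem.Str.slice line_to_process (some 3) (some 16),
   PySem.Str.slice line_to_process (some 17) none)

-- ===== PRECONDITION & SPEC =====
def Spec_get_time_date_and_racer_abbreviations_from_line (line_to_process : String) (out : String × String × String) : Prop := out = get_time_date_and_racer_abbreviations_from_line_alt line_to_process
instance (line_to_process : String) (out : String × String × String) : Decidable (Spec_get_time_date_and_racer_abbreviations_from_line line_to_process out) := by unfold Spec_get_time_date_and_racer_abbreviations_from_line; infer_instance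

-- ===== CLAIM (what is proved, stated in full; the proofs are below) =====
def Claim_equal_get_time_date_and_racer_abbreviations_from_line : Prop := ∀ (line_to_process : String), Dom_get_time_date_and_racer_abbreviations_from_line line_to_process → Spec_get_time_date_and_racer_abbreviations_from_line line_to_process (get_time_date_and_racer_abbreviations_from_line line_to_process)

-- ===== LEMMAS AND PROOFS =====
-- invariant of A's loop: starting at index i with accumulators (a,d,t), the loop appends
-- the chars of l whose 1-based overall index is ≤3 / in 4..16 / ≥18, respectively
theorem pvLoopA_eq (l : List Char) (i : Nat) (a d t : List Char) :
    pvLoopA l i (a, d, t) =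
      (a ++ l.take (4 - i),
       d ++ (l.drop (4 - i)).take (17 - max i 4),
       t ++ l.drop (18 - i)) := by
  induction l generalizing i a d t with
  | nil => simp [pvLoopA]
  | cons c rest ih =>
    simp only [pvLoopA]
    split_ifs with h1 h2 h3
    · rw [ih]
      have h4 : 4 - i = (3 - i) + 1 := by omega
      have h5 : 4 - (i + 1) = 3 - i := by omega
      have h6 : 17 - max (i + 1) 4 = 17 - max i 4 := by omega
      have h7 : 18 - i = (17 - i) + 1 := by omega
      have h8 : 18 - (i + 1) = 17 - i := by omega
      simp [h4, h5, h6, h7, h8, List.take_succ_cons, List.drop_succ_cons]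
    · rw [ih]
      have h4 : 4 - i = 0 := by omega
      have h5 : 4 - (i + 1) = 0 := by omega
      have h6 : 17 - max i 4 = (17 - max (i + 1) 4) + 1 := by omega
      have h7 : 18 - i = (17 - i) + 1 := by omega
      have h8 : 18 - (i + 1) = 17 - i := by omega
      simp [h4, h5, h6, h7, h8]
    · rw [ih]
      have h4 : 4 - i = 0 := by omega
      have h5 : 4 - (i + 1) = 0 := by omega
      have h6 : 17 - max i 4 = 0 := by omega
      have h7 : 17 - max (i + 1) 4 = 0 := by omega
      have h8 : 18 - i = 0 := by omega
      have h9 : 18 - (i + 1) = 0 := by omega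
      simp [h4, h5, h6, h7, h8, h9]
    · -- i = 17: the skipped character
      rw [ih]
      have hi : i = 17 := by omega
      subst hi
      simp


-- ===== VERDICT (by name: the statement is the Claim_ definition above) =====
theorem get_time_date_and_racer_abbreviations_from_line_spec : Claim_equal_get_time_date_and_racer_abbreviations_from_line := by
  intro s _
  show _ = _
  unfold get_time_date_and_racer_abbreviations_from_line get_time_date_and_racer_abbreviations_from_line_alt
  rw [pvLoopA_eq]
  simp [PySem.Str.slice, PySem.Chars.slice_eq_listSlice]
  refine ⟨?_, ?_, ?_⟩
  · rw [show ((3 : Int) = ((3 : Nat) : Int)) by norm_num, PySem.List.slice_to_natCast]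
  · rw [show ((3 : Int) = ((3 : Nat) : Int)) by norm_num,
        show ((16 : Int) = ((16 : Nat) : Int)) by norm_num, PySem.List.slice_natCast]
  · rw [show ((17 : Int) = ((17 : Nat) : Int)) by norm_num, PySem.List.slice_from_natCast]
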